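-- pv_equiv track=rewrite | github.com/JusSolo/Proy2-IA | prob1.py | notConnected
-- ===== SOURCE A (Python) =====
-- def notConnected(A):
--     from collections import deque
--
--     # Obtener todos los vértices
--     vertices = set()
--     for u, v in A:
--         vertices.add(u)
--         vertices.add(v)
--
--     if not vertices:
--         return True
--
--     # Crear lista de adyacencia
--     adj = {v: [] for v in vertices}
--     for u, v in A:
--         adj[u].append(v)
--         adj[v].append(u)
--
--     # Hacer BFS desde un vértice cualquiera
--     start = next(iter(vertices))
--     visited = set([start])
--     queue = deque([start])
--     while queue:
--         curr = queue.popleft()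
--         for neighbor in adj[curr]:
--             if neighbor not in visited:
--                 visited.add(neighbor)
--                 queue.append(neighbor)
--
--     # Si todos los vértices fueron visitados, está conectado
--     return visited != vertices
-- ===== SOURCE B (Python) =====
-- def notConnected(A):
--     # Collect the distinct vertices in first-appearance order.
--     vs = []
--     for u, v in A:
--         if u not in vs:
--             vs.append(u)
--         if v not in vs:
--             vs.append(v)
--     if not vs:
--         return True
--     # Fixed-point relaxation: sweep the edge list |vs| times, growing the
--     # set of vertices connected to vs[0]; no adjacency structure, no queue.
--     reached = {vs[0]}
--     for _ in range(len(vs)):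
--         for u, v in A:
--             if u in reached or v in reached:
--                 reached.add(u)
--                 reached.add(v)
--     return len(reached) != len(vs)
-- ===== Notes on version B (the rewrite author's own statement) =====
-- stated objective: alternative
-- what changed: Replaces BFS with an adjacency dict and a deque by a fixed-point relaxation: sweep the raw edge list |V| times growing the set of vertices connected to the first vertex, then compare set sizes; no adjacency list, no queue.
import Mathlib
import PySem

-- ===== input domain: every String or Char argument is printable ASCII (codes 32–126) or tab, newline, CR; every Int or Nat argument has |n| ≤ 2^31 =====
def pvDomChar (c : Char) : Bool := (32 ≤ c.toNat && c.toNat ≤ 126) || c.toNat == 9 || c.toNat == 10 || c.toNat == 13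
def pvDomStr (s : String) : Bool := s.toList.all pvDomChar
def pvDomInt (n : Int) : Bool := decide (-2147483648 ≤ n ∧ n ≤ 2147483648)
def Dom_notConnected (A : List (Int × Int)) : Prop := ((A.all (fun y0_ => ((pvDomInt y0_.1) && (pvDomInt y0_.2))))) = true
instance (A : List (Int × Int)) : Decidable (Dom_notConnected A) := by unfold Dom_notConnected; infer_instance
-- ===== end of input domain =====

-- B replaces A's BFS (adjacency dict + deque) by a fixed-point relaxation over the raw
-- edge list (|V| sweeps growing the set connected to the first vertex); return value only.

-- ===== PORT A =====
-- both Pythons collect the endpoints of the edges: A with 'vertices.add(u); vertices.add(v)'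
-- over a set, B by membership-guarded append to a list — in PySem both are exactly this fold
def pvVerts (A : List (Int × Int)) : PySem.Set Int :=
  A.foldl (fun s e => PySem.Set.add (PySem.Set.add s e.1) e.2) []

-- adj = {v: [] for v in vertices}; for u,v in A: adj[u].append(v); adj[v].append(u)
def pvAdj (A : List (Int × Int)) : PySem.Dict Int (List Int) :=
  let adj0 := (pvVerts A).foldl (fun d v => d.insert v ([] : List Int)) PySem.Dict.empty
  A.foldl (fun d e =>
    (d.modify e.1 [] (fun l => l ++ [e.2])).modify e.2 [] (fun l => l ++ [e.1])) adj0

-- the 'while queue' loop; fuel is only a totality guard (4*|A|+2 is provably enough)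
def pvBFS (adj : PySem.Dict Int (List Int)) : Nat → List Int → PySem.Set Int → PySem.Set Int
  | 0, _, vis => vis
  | _ + 1, [], vis => vis
  | fuel + 1, c :: rest, vis =>
      let p := (adj.getD c []).foldl
        (fun (p : PySem.Set Int × List Int) nb =>
          if nb ∈ p.1 then p else (PySem.Set.add p.1 nb, p.2 ++ [nb])) (vis, rest)
      pvBFS adj fuel p.2 p.1

def notConnected (A : List (Int × Int)) : Bool :=
  match pvVerts A with
  | [] => true
  | s :: t =>
    let adj := pvAdj A
    let visited := pvBFS adj (4 * A.length + 2) [s] (PySem.Set.ofList [s])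
    !(PySem.Set.equal visited (s :: t))

-- ===== PORT B =====
-- one sweep of the edge list: 'for u,v in A: if u in reached or v in reached: add both'
def pvSweep (l : List (Int × Int)) (r : PySem.Set Int) : PySem.Set Int :=
  l.foldl (fun r e =>
    if e.1 ∈ r ∨ e.2 ∈ r then PySem.Set.add (PySem.Set.add r e.1) e.2 else r) r

def notConnected_alt (A : List (Int × Int)) : Bool :=
  match pvVerts A with
  | [] => true
  | s :: t =>
    let reached := (PySem.List.pyRange 0 ((s :: t).length : Int) 1).foldl
      (fun r _ => pvSweep A r) (PySem.Set.ofList [s])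
    decide (¬ (reached.length = (s :: t).length))

-- ===== PRECONDITION & SPEC =====
def Spec_notConnected (A : List (Int × Int)) (out : Bool) : Prop := out = notConnected_alt A
instance (A : List (Int × Int)) (out : Bool) : Decidable (Spec_notConnected A out) := by unfold Spec_notConnected; infer_instance

-- ===== CLAIM (what is proved, stated in full; the proofs are below) =====
def Claim_equal_notConnected : Prop := ∀ (A : List (Int × Int)), Dom_notConnected A → Spec_notConnected A (notConnected A)

-- ===== LEMMAS AND PROOFS =====

-- reachability generated by the (undirected) edge list, from s
inductive Reach (A : List (Int × Int)) (s : Int) : Int → Prop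
  | refl : Reach A s s
  | fwd {u v : Int} : Reach A s u → (u, v) ∈ A → Reach A s v
  | bwd {u v : Int} : Reach A s v → (u, v) ∈ A → Reach A s u

theorem pvVerts_aux (l : List (Int × Int)) (s : PySem.Set Int) (x : Int) :
    (x ∈ l.foldl (fun s e => PySem.Set.add (PySem.Set.add s e.1) e.2) s ↔
      x ∈ s ∨ ∃ e ∈ l, x = e.1 ∨ x = e.2) := by
  induction l generalizing s with
  | nil => simp
  | cons e l ih =>
    simp only [List.foldl_cons, ih, PySem.Set.mem_add, List.mem_cons, exists_eq_or_imp,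
      or_assoc]

theorem mem_pvVerts {A : List (Int × Int)} {x : Int} :
    x ∈ pvVerts A ↔ ∃ e ∈ A, x = e.1 ∨ x = e.2 := by
  unfold pvVerts
  rw [pvVerts_aux]
  simp

theorem nodup_pvVerts (A : List (Int × Int)) : (pvVerts A).Nodup := by
  have aux : ∀ (l : List (Int × Int)) (s : PySem.Set Int), s.Nodup →
      (l.foldl (fun s e => PySem.Set.add (PySem.Set.add s e.1) e.2) s).Nodup := by
    intro l
    induction l with
    | nil => intro s hs; simpa using hs
    | cons e l ih =>
      intro s hs
      exact ih _ (PySem.Set.nodup_add _ _ (PySem.Set.nodup_add _ _ hs))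
  exact aux A [] List.nodup_nil

theorem length_pvVerts_le (A : List (Int × Int)) : (pvVerts A).length ≤ 2 * A.length := by
  have aux : ∀ (l : List (Int × Int)) (s : PySem.Set Int),
      (l.foldl (fun s e => PySem.Set.add (PySem.Set.add s e.1) e.2) s).length ≤
        s.length + 2 * l.length := by
    intro l
    induction l with
    | nil => intro s; simp
    | cons e l ih =>
      intro s
      have a1 : (PySem.Set.add s e.1).length ≤ s.length + 1 := by
        rw [PySem.Set.add_eq_ite]; split <;> simp
      have a2 : (PySem.Set.add (PySem.Set.add s e.1) e.2).length ≤ (PySem.Set.add s e.1).length + 1 := by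
        rw [PySem.Set.add_eq_ite (s := PySem.Set.add s e.1)]; split <;> simp
      have h3 := ih (PySem.Set.add (PySem.Set.add s e.1) e.2)
      simp only [List.foldl_cons, List.length_cons]
      omega
  simpa using aux A []

theorem mem_pvAdj {A : List (Int × Int)} {x y : Int} :
    y ∈ (pvAdj A).getD x [] ↔ (x, y) ∈ A ∨ (y, x) ∈ A := by
  have base : ∀ (vs : List Int) (d : PySem.Dict Int (List Int)),
      (∀ c : Int, d.getD c [] = []) →
      ∀ c : Int, (vs.foldl (fun d v => d.insert v ([] : List Int)) d).getD c [] = [] := by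
    intro vs
    induction vs with
    | nil => intro d hd c; exact hd c
    | cons v vs ih =>
      intro d hd c
      refine ih _ ?_ c
      intro c'
      rw [PySem.Dict.getD_insert]
      split <;> simp [hd]
  have step : ∀ (l : List (Int × Int)) (d : PySem.Dict Int (List Int)),
      (y ∈ (l.foldl (fun d e =>
          (d.modify e.1 [] (fun t => t ++ [e.2])).modify e.2 [] (fun t => t ++ [e.1])) d).getD x [] ↔
        y ∈ d.getD x [] ∨ (x, y) ∈ l ∨ (y, x) ∈ l) := by
    intro l
    induction l with
    | nil => simp
    | cons e l ih =>
      obtain ⟨a, b⟩ := e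
      intro d
      simp only [List.foldl_cons, ih, List.mem_cons]
      simp only [PySem.Dict.getD_modify]
      by_cases hxb : x = b <;> by_cases hxa : x = a <;>
        simp_all [Prod.mk.injEq, List.mem_append] <;> tauto
  unfold pvAdj
  rw [step]
  have h0 : ∀ c : Int, (PySem.Dict.empty : PySem.Dict Int (List Int)).getD c [] = [] := by
    intro c; simp [PySem.Dict.getD_empty]
  rw [base (pvVerts A) PySem.Dict.empty h0 x]
  simp


-- ---------- B side: sweep lemmas ----------

theorem pvSweep_cons (e : Int × Int) (l : List (Int × Int)) (r : PySem.Set Int) :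
    pvSweep (e :: l) r =
      pvSweep l (if e.1 ∈ r ∨ e.2 ∈ r then PySem.Set.add (PySem.Set.add r e.1) e.2 else r) := rfl

theorem prefix_step (e : Int × Int) (r : PySem.Set Int) :
    r <+: (if e.1 ∈ r ∨ e.2 ∈ r then PySem.Set.add (PySem.Set.add r e.1) e.2 else r) := by
  split
  · refine List.IsPrefix.trans (l₂ := PySem.Set.add r e.1) ?_ ?_
    · rw [PySem.Set.add_eq_ite]; split
      · exact List.prefix_rfl
      · exact ⟨[e.1], rfl⟩
    · rw [PySem.Set.add_eq_ite (s := PySem.Set.add r e.1)]; split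
      · exact List.prefix_rfl
      · exact ⟨[e.2], rfl⟩
  · exact List.prefix_rfl

theorem prefix_pvSweep (A : List (Int × Int)) (r : PySem.Set Int) : r <+: pvSweep A r := by
  induction A generalizing r with
  | nil => exact List.prefix_rfl
  | cons e l ih =>
    rw [pvSweep_cons]
    exact List.IsPrefix.trans (prefix_step e r) (ih _)

theorem nodup_pvSweep (A : List (Int × Int)) {r : PySem.Set Int} (h : r.Nodup) :
    (pvSweep A r).Nodup := by
  induction A generalizing r with
  | nil => exact h
  | cons e l ih =>
    rw [pvSweep_cons]
    split
    · exact ih (PySem.Set.nodup_add _ _ (PySem.Set.nodup_add _ _ h))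
    · exact ih h

theorem mem_pvSweep {A : List (Int × Int)} {r : PySem.Set Int} {x : Int} (h : x ∈ pvSweep A r) :
    x ∈ r ∨ ∃ e ∈ A, x = e.1 ∨ x = e.2 := by
  induction A generalizing r with
  | nil => exact Or.inl h
  | cons e l ih =>
    rw [pvSweep_cons] at h
    have h' : x ∈ r ∨ (x = e.1 ∨ x = e.2) ∨ ∃ f ∈ l, x = f.1 ∨ x = f.2 := by
      split_ifs at h with hc
      · rcases ih h with h' | h'
        · simp only [PySem.Set.mem_add] at h'
          tauto
        · exact Or.inr (Or.inr h')
      · rcases ih h with h' | h'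
        · exact Or.inl h'
        · exact Or.inr (Or.inr h')
    rcases h' with h' | h' | h'
    · exact Or.inl h'
    · exact Or.inr ⟨e, List.mem_cons_self, h'⟩
    · obtain ⟨f, hf, hx⟩ := h'
      exact Or.inr ⟨f, List.mem_cons_of_mem _ hf, hx⟩

theorem reach_pvSweep {A : List (Int × Int)} {s : Int} (l : List (Int × Int))
    (hl : ∀ e ∈ l, e ∈ A) {r : PySem.Set Int} (hr : ∀ x ∈ r, Reach A s x) :
    ∀ x ∈ pvSweep l r, Reach A s x := by
  induction l generalizing r with
  | nil => exact hr
  | cons e l ih =>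
    rw [pvSweep_cons]
    have heA : (e.1, e.2) ∈ A := by simpa using hl e List.mem_cons_self
    split
    · rename_i hc
      refine ih (fun f hf => hl f (List.mem_cons_of_mem _ hf)) ?_
      intro x hx
      simp only [PySem.Set.mem_add] at hx
      have h1 : Reach A s e.1 ∨ Reach A s e.2 := by
        rcases hc with hc | hc
        · exact Or.inl (hr _ hc)
        · exact Or.inr (hr _ hc)
      have he1 : Reach A s e.1 := by
        rcases h1 with h1 | h1
        · exact h1
        · exact Reach.bwd h1 heA
      have he2 : Reach A s e.2 := Reach.fwd he1 heA
      rcases hx with (hx | rfl) | rfl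
      · exact hr _ hx
      · exact he1
      · exact he2
    · exact ih (fun f hf => hl f (List.mem_cons_of_mem _ hf)) hr

theorem mem_pvSweep_of_edge {l : List (Int × Int)} {r : PySem.Set Int} {u v : Int}
    (he : (u, v) ∈ l) (h : u ∈ r ∨ v ∈ r) :
    u ∈ pvSweep l r ∧ v ∈ pvSweep l r := by
  induction l generalizing r with
  | nil => cases he
  | cons e l ih =>
    rw [pvSweep_cons]
    have hmono : ∀ w : Int, w ∈ r →
        w ∈ (if e.1 ∈ r ∨ e.2 ∈ r then PySem.Set.add (PySem.Set.add r e.1) e.2 else r) := by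
      intro w hw
      split
      · simp [PySem.Set.mem_add, hw]
      · exact hw
    rcases List.mem_cons.mp he with heq | he'
    · have he1 : e.1 = u := by rw [← heq]
      have he2 : e.2 = v := by rw [← heq]
      rw [if_pos (by rw [he1, he2]; exact h)]
      have hsub := (prefix_pvSweep l (PySem.Set.add (PySem.Set.add r e.1) e.2)).subset
      constructor
      · exact hsub (by simp [PySem.Set.mem_add, he1])
      · exact hsub (by simp [PySem.Set.mem_add, he2])
    · have h' : u ∈ (if e.1 ∈ r ∨ e.2 ∈ r then PySem.Set.add (PySem.Set.add r e.1) e.2 else r) ∨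
          v ∈ (if e.1 ∈ r ∨ e.2 ∈ r then PySem.Set.add (PySem.Set.add r e.1) e.2 else r) := by
        rcases h with h | h
        · exact Or.inl (hmono u h)
        · exact Or.inr (hmono v h)
      exact ih he' h'

theorem pvSweep_eq_of_closed {l : List (Int × Int)} {r : PySem.Set Int}
    (h : ∀ e ∈ l, e.1 ∈ r ∧ e.2 ∈ r) : pvSweep l r = r := by
  induction l with
  | nil => rfl
  | cons e l ih =>
    rw [pvSweep_cons]
    have he := h e List.mem_cons_self
    have h1 : PySem.Set.add (PySem.Set.add r e.1) e.2 = r := by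
      rw [PySem.Set.add_of_mem he.1, PySem.Set.add_of_mem he.2]
    have h2 : (if e.1 ∈ r ∨ e.2 ∈ r then PySem.Set.add (PySem.Set.add r e.1) e.2 else r) = r := by
      split
      · exact h1
      · rfl
    rw [h2]
    exact ih (fun f hf => h f (List.mem_cons_of_mem _ hf))

theorem iterate_sweep_inv (A : List (Int × Int)) (s : Int) :
    ∀ (n : Nat) (r : PySem.Set Int), r.Nodup → (∀ x ∈ r, x ∈ pvVerts A) →
      (∀ x ∈ r, Reach A s x) →
      ((pvSweep A)^[n] r).Nodup ∧ (∀ x ∈ (pvSweep A)^[n] r, x ∈ pvVerts A) ∧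
        (∀ x ∈ (pvSweep A)^[n] r, Reach A s x) ∧ r <+: (pvSweep A)^[n] r := by
  intro n
  induction n with
  | zero => intro r h1 h2 h3; exact ⟨h1, h2, h3, by simp⟩
  | succ n ih =>
    intro r h1 h2 h3
    have hsV : ∀ x ∈ pvSweep A r, x ∈ pvVerts A := by
      intro x hx
      rcases mem_pvSweep hx with h | ⟨e, he, hxe⟩
      · exact h2 x h
      · exact mem_pvVerts.mpr ⟨e, he, hxe⟩
    have := ih (pvSweep A r) (nodup_pvSweep A h1) hsV
      (reach_pvSweep A (fun _ h => h) h3)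
    rw [Function.iterate_succ_apply]
    exact ⟨this.1, this.2.1, this.2.2.1,
      List.IsPrefix.trans (prefix_pvSweep A r) this.2.2.2⟩

theorem sweep_iterate_fix (A : List (Int × Int)) :
    ∀ (n : Nat) (r : PySem.Set Int), r.Nodup → (∀ x ∈ r, x ∈ pvVerts A) →
      (pvVerts A).length ≤ n + r.length →
      pvSweep A ((pvSweep A)^[n] r) = (pvSweep A)^[n] r := by
  intro n
  induction n with
  | zero =>
    intro r h1 h2 hlen
    simp only [Function.iterate_zero, id_eq]
    have hVr : ∀ x ∈ pvVerts A, x ∈ r := by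
      intro x hx
      by_contra hxr
      have hnd : (x :: r).Nodup := List.nodup_cons.mpr ⟨hxr, h1⟩
      have hsub : (x :: r) ⊆ pvVerts A := by
        intro y hy
        rcases List.mem_cons.mp hy with rfl | hy
        · exact hx
        · exact h2 y hy
      have := (hnd.subperm hsub).length_le
      simp only [List.length_cons] at this
      omega
    refine pvSweep_eq_of_closed ?_
    intro e he
    constructor
    · exact hVr _ (mem_pvVerts.mpr ⟨e, he, Or.inl rfl⟩)
    · exact hVr _ (mem_pvVerts.mpr ⟨e, he, Or.inr rfl⟩)
  | succ n ih =>
    intro r h1 h2 hlen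
    by_cases hfix : pvSweep A r = r
    · have hall : ∀ m : Nat, (pvSweep A)^[m] r = r := fun m => Function.iterate_fixed hfix m
      rw [hall, hfix]
    · have hpre := prefix_pvSweep A r
      have hlt : r.length < (pvSweep A r).length := by
        rcases Nat.lt_or_ge r.length (pvSweep A r).length with h | h
        · exact h
        · exact absurd (List.IsPrefix.eq_of_length hpre
            (Nat.le_antisymm hpre.length_le h)).symm hfix
      have hsV : ∀ x ∈ pvSweep A r, x ∈ pvVerts A := by
        intro x hx
        rcases mem_pvSweep hx with h | ⟨e, he, hxe⟩
        · exact h2 x h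
        · exact mem_pvVerts.mpr ⟨e, he, hxe⟩
      rw [Function.iterate_succ_apply]
      exact ih (pvSweep A r) (nodup_pvSweep A h1) hsV (by omega)

-- range(n) loop ignoring the index is Function.iterate
theorem foldl_pyRange_iterate (f : PySem.Set Int → PySem.Set Int) (n : Nat)
    (init : PySem.Set Int) :
    (PySem.List.pyRange 0 (n : Int) 1).foldl (fun r _ => f r) init = f^[n] init := by
  induction n with
  | zero => simp [PySem.List.pyRange_one_eq_nil]
  | succ n ih =>
    have h : (PySem.List.pyRange 0 ((n + 1 : Nat) : Int) 1) =
        PySem.List.pyRange 0 (n : Int) 1 ++ [(n : Int)] := by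
      have := PySem.List.pyRange_one_succ_right (a := 0) (b := (n : Int)) (by positivity)
      rw [← this]
      norm_num
    rw [h, List.foldl_append, ih, Function.iterate_succ_apply']
    rfl

-- ---------- A side: BFS lemmas ----------

theorem bfs_inner (ns : List Int) :
    ∀ (vis : PySem.Set Int) (q : List Int), vis.Nodup →
      ∃ Δ : List Int,
        (ns.foldl (fun (p : PySem.Set Int × List Int) nb =>
            if nb ∈ p.1 then p else (PySem.Set.add p.1 nb, p.2 ++ [nb])) (vis, q)) =
          (vis ++ Δ, q ++ Δ) ∧
        (∀ y ∈ Δ, y ∈ ns) ∧ (∀ y ∈ ns, y ∈ vis ++ Δ) ∧ (vis ++ Δ).Nodup := by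
  induction ns with
  | nil =>
    intro vis q h
    exact ⟨[], by simp, by simp, by simp, by simpa⟩
  | cons nb ns ih =>
    intro vis q h
    simp only [List.foldl_cons]
    by_cases hnb : nb ∈ vis
    · rw [if_pos hnb]
      obtain ⟨Δ, h1, h2, h3, h4⟩ := ih vis q h
      refine ⟨Δ, h1, fun y hy => List.mem_cons_of_mem _ (h2 y hy), ?_, h4⟩
      intro y hy
      rcases List.mem_cons.mp hy with rfl | hy
      · exact List.mem_append_left _ hnb
      · exact h3 y hy
    · rw [if_neg hnb]
      have hadd : PySem.Set.add vis nb = vis ++ [nb] := PySem.Set.add_of_not_mem hnb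
      have hnd : (vis ++ [nb]).Nodup := by
        rw [← hadd]; exact PySem.Set.nodup_add _ _ h
      rw [hadd]
      obtain ⟨Δ, h1, h2, h3, h4⟩ := ih (vis ++ [nb]) (q ++ [nb]) hnd
      refine ⟨nb :: Δ, ?_, ?_, ?_, ?_⟩
      · rw [h1]
        simp
      · intro y hy
        rcases List.mem_cons.mp hy with rfl | hy
        · exact List.mem_cons_self
        · exact List.mem_cons_of_mem _ (h2 y hy)
      · intro y hy
        rcases List.mem_cons.mp hy with rfl | hy
        · simp
        · have := h3 y hy
          simpa [List.append_assoc] using this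
      · simpa [List.append_assoc] using h4

theorem pvBFS_spec (A : List (Int × Int)) (s : Int) :
    ∀ (fuel : Nat) (q : List Int) (vis : PySem.Set Int),
      vis.Nodup →
      (∀ x ∈ vis, x ∈ pvVerts A) →
      (∀ x ∈ q, x ∈ vis) →
      (∀ x ∈ vis, Reach A s x) →
      (∀ x ∈ vis, x ∉ q → ∀ y ∈ (pvAdj A).getD x [], y ∈ vis) →
      q.length + 2 * ((pvVerts A).length - vis.length) ≤ fuel →
      (∀ x ∈ vis, x ∈ pvBFS (pvAdj A) fuel q vis) ∧
      (pvBFS (pvAdj A) fuel q vis).Nodup ∧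
      (∀ x ∈ pvBFS (pvAdj A) fuel q vis, x ∈ pvVerts A) ∧
      (∀ x ∈ pvBFS (pvAdj A) fuel q vis, Reach A s x) ∧
      (∀ x ∈ pvBFS (pvAdj A) fuel q vis, ∀ y ∈ (pvAdj A).getD x [], y ∈ pvBFS (pvAdj A) fuel q vis) := by
  intro fuel
  induction fuel with
  | zero =>
    intro q vis h1 h2 h3 h4 h5 hf
    have hq : q = [] := List.eq_nil_of_length_eq_zero (by omega)
    subst hq
    simp only [pvBFS]
    exact ⟨fun x hx => hx, h1, h2, h4, fun x hx => h5 x hx (by simp)⟩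
  | succ fuel ih =>
    intro q vis h1 h2 h3 h4 h5 hf
    cases q with
    | nil =>
      simp only [pvBFS]
      exact ⟨fun x hx => hx, h1, h2, h4, fun x hx => h5 x hx (by simp)⟩
    | cons c rest =>
      obtain ⟨Δ, hfold, hΔns, hns, hnd⟩ := bfs_inner ((pvAdj A).getD c []) vis rest h1
      have hstep : pvBFS (pvAdj A) (fuel + 1) (c :: rest) vis =
          pvBFS (pvAdj A) fuel (rest ++ Δ) (vis ++ Δ) := by
        simp only [pvBFS, hfold]
      have hΔedge : ∀ y ∈ Δ, (c, y) ∈ A ∨ (y, c) ∈ A := by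
        intro y hy
        exact mem_pvAdj.mp (hΔns y hy)
      have hΔV : ∀ y ∈ Δ, y ∈ pvVerts A := by
        intro y hy
        rcases hΔedge y hy with h | h
        · exact mem_pvVerts.mpr ⟨(c, y), h, Or.inr rfl⟩
        · exact mem_pvVerts.mpr ⟨(y, c), h, Or.inl rfl⟩
      have hcvis : c ∈ vis := h3 c List.mem_cons_self
      have hreachC : Reach A s c := h4 c hcvis
      have h2' : ∀ x ∈ vis ++ Δ, x ∈ pvVerts A := by
        intro x hx
        rcases List.mem_append.mp hx with hx | hx
        · exact h2 x hx
        · exact hΔV x hx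
      have h3' : ∀ x ∈ rest ++ Δ, x ∈ vis ++ Δ := by
        intro x hx
        rcases List.mem_append.mp hx with hx | hx
        · exact List.mem_append_left _ (h3 x (List.mem_cons_of_mem _ hx))
        · exact List.mem_append_right _ hx
      have h4' : ∀ x ∈ vis ++ Δ, Reach A s x := by
        intro x hx
        rcases List.mem_append.mp hx with hx | hx
        · exact h4 x hx
        · rcases hΔedge x hx with h | h
          · exact Reach.fwd hreachC h
          · exact Reach.bwd hreachC h
      have h5' : ∀ x ∈ vis ++ Δ, x ∉ rest ++ Δ →
          ∀ y ∈ (pvAdj A).getD x [], y ∈ vis ++ Δ := by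
        intro x hx hxq y hy
        rcases List.mem_append.mp hx with hx | hx
        · by_cases hxc : x = c
          · subst hxc
            exact hns y hy
          · have hxrest : x ∉ c :: rest := by
              intro hmem
              rcases List.mem_cons.mp hmem with h | h
              · exact hxc h
              · exact hxq (List.mem_append_left _ h)
            exact List.mem_append_left _ (h5 x hx hxrest y hy)
        · exact absurd (List.mem_append_right _ hx) hxq
      have hlenV : (vis ++ Δ).length ≤ (pvVerts A).length :=
        (hnd.subperm h2').length_le
      have hf' : (rest ++ Δ).length + 2 * ((pvVerts A).length - (vis ++ Δ).length) ≤ fuel := by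
        simp only [List.length_append] at hlenV ⊢
        simp only [List.length_cons] at hf
        omega
      have := ih (rest ++ Δ) (vis ++ Δ) hnd h2' h3' h4' h5' hf'
      rw [hstep]
      exact ⟨fun x hx => this.1 x (List.mem_append_left _ hx), this.2.1, this.2.2.1,
        this.2.2.2.1, this.2.2.2.2⟩

-- ---------- characterizations ----------

theorem bfs_reach (A : List (Int × Int)) (s : Int) (t : List Int)
    (hV : pvVerts A = s :: t) :
    (∀ x, x ∈ pvBFS (pvAdj A) (4 * A.length + 2) [s] (PySem.Set.ofList [s]) ↔ Reach A s x) ∧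
    (pvBFS (pvAdj A) (4 * A.length + 2) [s] (PySem.Set.ofList [s])).Nodup ∧
    (∀ x ∈ pvBFS (pvAdj A) (4 * A.length + 2) [s] (PySem.Set.ofList [s]), x ∈ pvVerts A) := by
  have hsV : s ∈ pvVerts A := by rw [hV]; exact List.mem_cons_self
  have hof : (PySem.Set.ofList [s] : PySem.Set Int) = [s] := rfl
  have hVlen : (pvVerts A).length ≤ 2 * A.length := length_pvVerts_le A
  have hspec := pvBFS_spec A s (4 * A.length + 2) [s] (PySem.Set.ofList [s])
    (by rw [hof]; simp)
    (by rw [hof]; intro x hx; rcases List.mem_singleton.mp hx with rfl; exact hsV)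
    (by rw [hof]; exact fun x hx => hx)
    (by rw [hof]; intro x hx; rcases List.mem_singleton.mp hx with rfl; exact Reach.refl)
    (by rw [hof]; intro x hx hxq; exact absurd hx hxq)
    (by rw [hof]; simp only [List.length_singleton]; omega)
  obtain ⟨hmem, hnd, hsubV, hreach, hclosed⟩ := hspec
  refine ⟨?_, hnd, hsubV⟩
  intro x
  constructor
  · exact hreach x
  · intro hr
    induction hr with
    | refl => exact hmem s (by rw [hof]; exact List.mem_singleton.mpr rfl)
    | fwd hu he ihu => exact hclosed _ ihu _ (mem_pvAdj.mpr (Or.inl he))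
    | bwd hv he ihv => exact hclosed _ ihv _ (mem_pvAdj.mpr (Or.inr he))

theorem relax_reach (A : List (Int × Int)) (s : Int) (t : List Int)
    (hV : pvVerts A = s :: t) :
    (∀ x, x ∈ (pvSweep A)^[(s :: t).length] (PySem.Set.ofList [s]) ↔ Reach A s x) ∧
    ((pvSweep A)^[(s :: t).length] (PySem.Set.ofList [s])).Nodup ∧
    (∀ x ∈ (pvSweep A)^[(s :: t).length] (PySem.Set.ofList [s]), x ∈ pvVerts A) := by
  have hsV : s ∈ pvVerts A := by rw [hV]; exact List.mem_cons_self
  have hof : (PySem.Set.ofList [s] : PySem.Set Int) = [s] := rfl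
  have h1 : ([s] : PySem.Set Int).Nodup := by simp
  have h2 : ∀ x ∈ ([s] : List Int), x ∈ pvVerts A := by
    intro x hx; rcases List.mem_singleton.mp hx with rfl; exact hsV
  have h3 : ∀ x ∈ ([s] : List Int), Reach A s x := by
    intro x hx; rcases List.mem_singleton.mp hx with rfl; exact Reach.refl
  rw [hof]
  obtain ⟨hnd, hsubV, hreach, hpre⟩ := iterate_sweep_inv A s ((s :: t).length) [s] h1 h2 h3
  have hfixlen : (pvVerts A).length ≤ (s :: t).length + ([s] : List Int).length := by
    rw [hV]; simp
  have hfix := sweep_iterate_fix A ((s :: t).length) [s] h1 h2 hfixlen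
  have hclosed : ∀ u v : Int, (u, v) ∈ A →
      (u ∈ (pvSweep A)^[(s :: t).length] [s] ∨ v ∈ (pvSweep A)^[(s :: t).length] [s]) →
      u ∈ (pvSweep A)^[(s :: t).length] [s] ∧ v ∈ (pvSweep A)^[(s :: t).length] [s] := by
    intro u v he hm
    have := mem_pvSweep_of_edge (r := (pvSweep A)^[(s :: t).length] [s]) he hm
    rwa [hfix] at this
  refine ⟨?_, hnd, hsubV⟩
  intro x
  constructor
  · exact hreach x
  · intro hr
    induction hr with
    | refl => exact hpre.subset List.mem_cons_self
    | fwd hu he ihu => exact (hclosed _ _ he (Or.inl ihu)).2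
    | bwd hv he ihv => exact (hclosed _ _ he (Or.inr ihv)).1


-- ===== VERDICT (by name: the statement is the Claim_ definition above) =====
theorem notConnected_spec : Claim_equal_notConnected := by
  unfold Claim_equal_notConnected
  intro A _
  unfold Spec_notConnected notConnected notConnected_alt
  cases hV : pvVerts A with
  | nil => rfl
  | cons s t =>
    simp only []
    rw [foldl_pyRange_iterate (pvSweep A) ((s :: t).length)]
    obtain ⟨hRiff, hRnd, hRV⟩ := bfs_reach A s t hV
    obtain ⟨hFiff, hFnd, hFV⟩ := relax_reach A s t hV
    set R := pvBFS (pvAdj A) (4 * A.length + 2) [s] (PySem.Set.ofList [s]) with hR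
    set F := (pvSweep A)^[(s :: t).length] (PySem.Set.ofList [s]) with hF
    have hVnd : (s :: t).Nodup := by rw [← hV]; exact nodup_pvVerts A
    have hFsubV : F ⊆ (s :: t) := by
      intro x hx
      have := hFV x hx
      rwa [hV] at this
    have hRsubV : R ⊆ (s :: t) := by
      intro x hx
      have := hRV x hx
      rwa [hV] at this
    have key : (PySem.Set.equal R (s :: t) = true) ↔ F.length = (s :: t).length := by
      constructor
      · intro hb
        have hiff := (PySem.Set.equal_iff R (s :: t)).mp hb
        have hVsubF : (s :: t) ⊆ F := by
          intro x hx
          exact (hFiff x).mpr (hRiff x |>.mp ((hiff x).mpr hx))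
        exact Nat.le_antisymm ((hFnd.subperm hFsubV).length_le)
          ((hVnd.subperm hVsubF).length_le)
      · intro hp
        have hperm : List.Perm F (s :: t) := (hFnd.subperm hFsubV).perm_of_length_le (by omega)
        have hVsubF : (s :: t) ⊆ F := fun x hx => (hperm.mem_iff).mpr hx
        refine (PySem.Set.equal_iff R (s :: t)).mpr ?_
        intro x
        constructor
        · exact fun hx => hRsubV hx
        · intro hx
          exact (hRiff x).mpr ((hFiff x).mp (hVsubF hx))
    by_cases hp : F.length = (s :: t).length
    · rw [key.mpr hp]
      simp [hp]
    · have heq : PySem.Set.equal R (s :: t) = false := by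
        cases hb : PySem.Set.equal R (s :: t)
        · rfl
        · exact absurd (key.mp hb) hp
      rw [heq]
      simpa using hp
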